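-- pv_equiv track=rewrite | github.com/maykinmedia/zds-token-issuer | src/token_issuer/services/service.py | clean_scopes
-- ===== SOURCE A (Python) =====
-- from typing import Any, Dict, List, Optional
--
-- def clean_scopes(scopes: List[str]) -> List[str]:
--     result = []
--     for scope in scopes:
--         if '|' in scope:
--             bits = [bit for bit in scope.strip('(').strip(')').split(' | ')]
--             result += clean_scopes(bits)
--         else:
--             result.append(scope)
--     return result
-- ===== SOURCE B (Python) =====
-- def clean_scopes(scopes):
--     result = []
--     stack = list(reversed(scopes))
--     while stack:
--         scope = stack.pop()
--         if '|' in scope: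
--             bits = scope.strip('(').strip(')').split(' | ')
--             stack.extend(reversed(bits))
--         else:
--             result.append(scope)
--     return result
-- ===== Notes on version B (the rewrite author's own statement) =====
-- stated objective: alternative
-- what changed: Replaced A's recursion (recursive call on the split bits inside the loop) with an iterative stack-based worklist: scopes are pushed reversed, split bits are pushed back reversed, giving the same depth-first left-to-right output without recursion.
import Mathlib
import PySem

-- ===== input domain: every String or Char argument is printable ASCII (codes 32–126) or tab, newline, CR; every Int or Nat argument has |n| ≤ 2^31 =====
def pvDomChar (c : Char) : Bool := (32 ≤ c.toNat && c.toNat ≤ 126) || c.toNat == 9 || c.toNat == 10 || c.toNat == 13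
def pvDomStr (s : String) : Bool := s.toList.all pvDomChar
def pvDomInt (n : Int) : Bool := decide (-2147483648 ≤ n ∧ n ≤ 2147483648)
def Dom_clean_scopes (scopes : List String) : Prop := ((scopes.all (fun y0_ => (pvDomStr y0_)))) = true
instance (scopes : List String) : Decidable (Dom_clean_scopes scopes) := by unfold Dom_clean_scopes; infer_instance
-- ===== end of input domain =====

-- B replaces A's recursion with an iterative stack worklist (same output order); return-value equivalence on Pre_ (where A terminates).

-- ===== PORT A =====
-- scope.strip('(').strip(')').split(' | ')  (sep is the non-empty literal ' | ', so split? is always `some`)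
def pvBits (scope : String) : List String :=
  (PySem.Str.split? (PySem.Str.stripChars (PySem.Str.stripChars scope "(") ")") " | ").getD []

-- A's recursion, made total with a fuel counter (fuel 0 is never reached on Pre_ inputs; Python raises RecursionError exactly outside Pre_).
def pvCleanA : Nat → List String → List String
  | 0, _ => []
  | fuel + 1, scopes =>
    scopes.foldl (fun result scope =>
      if PySem.Str.isIn "|" scope then result ++ pvCleanA fuel (pvBits scope)
      else result ++ [scope]) []

def clean_scopes (scopes : List String) : List String :=
  pvCleanA (scopes.length + 2) scopes

-- ===== PORT B =====
-- Source B's while-loop: stack with its top at the list head (Python pushes reversed, pops from the end;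
-- here `pvBits scope ++ rest` is exactly `stack.extend(reversed(bits))`). Fuel is a totality guard only.
def pvCleanB : Nat → List String → List String → List String
  | 0, _, result => result
  | fuel + 1, stack, result =>
    match stack with
    | [] => result
    | scope :: rest =>
      if PySem.Str.isIn "|" scope then pvCleanB fuel (pvBits scope ++ rest) result
      else pvCleanB fuel rest (result ++ [scope])

def pvFuelB (scopes : List String) : Nat :=
  1 + (scopes.map (fun s => 1 + (pvBits s).length)).sum

def clean_scopes_alt (scopes : List String) : List String :=
  pvCleanB (pvFuelB scopes) scopes []

-- ===== PRECONDITION & SPEC =====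
-- Pre_ excludes exactly the inputs on which A raises RecursionError: a scope containing '|'
-- whose strip/split bits still contain '|' makes A recurse forever (the split bits never
-- contain ' | ', so such a bit reproduces itself under strip/split).
def Pre_clean_scopes (scopes : List String) : Prop :=
  ∀ s ∈ scopes, PySem.Str.isIn "|" s = true → ∀ b ∈ pvBits s, PySem.Str.isIn "|" b = false

instance (scopes : List String) : Decidable (Pre_clean_scopes scopes) := by
  unfold Pre_clean_scopes; infer_instance

def pvWitness_clean_scopes : List String := ["(read | write)", "admin"]

def Spec_clean_scopes (scopes : List String) (out : List String) : Prop := out = clean_scopes_alt scopes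
instance (scopes : List String) (out : List String) : Decidable (Spec_clean_scopes scopes out) := by unfold Spec_clean_scopes; infer_instance

-- ===== CLAIM (what is proved, stated in full; the proofs are below) =====
def Claim_equal_clean_scopes : Prop := ∀ (scopes : List String), Dom_clean_scopes scopes → Pre_clean_scopes scopes → Spec_clean_scopes scopes (clean_scopes scopes)

-- ===== LEMMAS AND PROOFS =====

-- the one-step expansion both ports compute on Pre_ inputs
def pvF (s : String) : List String :=
  if PySem.Str.isIn "|" s then pvBits s else [s]

-- iteration cost of one stack entry in B
def pvCost (s : String) : Nat :=
  1 + (if PySem.Str.isIn "|" s then (pvBits s).length else 0)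

def pvMu (l : List String) : Nat := (l.map pvCost).sum

theorem pvF_of_pipeFree {s : String} (h : PySem.Str.isIn "|" s = false) : pvF s = [s] := by
  unfold pvF; rw [if_neg (by rw [h]; exact Bool.false_ne_true)]

theorem pvFlatMap_pipeFree {l : List String} (h : ∀ b ∈ l, PySem.Str.isIn "|" b = false) :
    l.flatMap pvF = l := by
  induction l with
  | nil => rfl
  | cons a t ih =>
    rw [List.flatMap_cons, pvF_of_pipeFree (h a (List.mem_cons_self ..)),
      ih (fun b hb => h b (List.mem_cons_of_mem _ hb)), List.singleton_append]

-- A on a pipe-free list just copies it (any positive fuel)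
theorem pvCleanA_pipeFree (fuel : Nat) {l : List String}
    (h : ∀ b ∈ l, PySem.Str.isIn "|" b = false) :
    pvCleanA (fuel + 1) l = l := by
  show l.foldl _ [] = l
  have key : ∀ (l' : List String), (∀ b ∈ l', PySem.Str.isIn "|" b = false) →
      ∀ (acc : List String),
      l'.foldl (fun result scope =>
        if PySem.Str.isIn "|" scope then result ++ pvCleanA fuel (pvBits scope)
        else result ++ [scope]) acc = acc ++ l' := by
    intro l' hl'
    induction l' with
    | nil => intro acc; rw [List.foldl_nil, List.append_nil]
    | cons a t ih =>
      intro acc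
      rw [List.foldl_cons, if_neg (by rw [hl' a (List.mem_cons_self ..)]; exact Bool.false_ne_true),
        ih (fun b hb => hl' b (List.mem_cons_of_mem _ hb)) (acc ++ [a])]
      simp
  simpa using key l h []

-- A equals the flatMap expansion on Pre_ inputs, for any fuel ≥ 2
theorem pvCleanA_eq_flatMap (fuel : Nat) {scopes : List String}
    (hp : Pre_clean_scopes scopes) :
    pvCleanA (fuel + 2) scopes = scopes.flatMap pvF := by
  show scopes.foldl _ [] = _
  have key : ∀ (l : List String),
      (∀ s ∈ l, PySem.Str.isIn "|" s = true → ∀ b ∈ pvBits s, PySem.Str.isIn "|" b = false) →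
      ∀ (acc : List String),
      l.foldl (fun result scope =>
        if PySem.Str.isIn "|" scope then result ++ pvCleanA (fuel + 1) (pvBits scope)
        else result ++ [scope]) acc = acc ++ l.flatMap pvF := by
    intro l hl
    induction l with
    | nil => intro acc; rw [List.foldl_nil, List.flatMap_nil, List.append_nil]
    | cons a t ih =>
      intro acc
      rw [List.foldl_cons, List.flatMap_cons]
      by_cases hpipe : PySem.Str.isIn "|" a = true
      · rw [if_pos hpipe, pvCleanA_pipeFree fuel (hl a (List.mem_cons_self ..) hpipe),
          ih (fun s hs => hl s (List.mem_cons_of_mem _ hs)) (acc ++ pvBits a)]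
        rw [pvF, if_pos hpipe, List.append_assoc]
      · rw [if_neg hpipe, ih (fun s hs => hl s (List.mem_cons_of_mem _ hs)) (acc ++ [a])]
        rw [pvF, if_neg hpipe, List.append_assoc, List.singleton_append]
  simpa using key scopes hp []

theorem pvMu_pipeFree {l : List String} (h : ∀ b ∈ l, PySem.Str.isIn "|" b = false) :
    pvMu l = l.length := by
  induction l with
  | nil => rfl
  | cons a t ih =>
    unfold pvMu at *
    rw [List.map_cons, List.sum_cons, List.length_cons,
      ih (fun b hb => h b (List.mem_cons_of_mem _ hb))]
    unfold pvCost
    rw [if_neg (by rw [h a (List.mem_cons_self ..)]; exact Bool.false_ne_true)]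
    omega

-- B's loop invariant: with enough fuel and a stack whose pipe-bearing entries split pipe-free,
-- the loop returns result ++ flatMap pvF stack
theorem pvCleanB_eq (fuel : Nat) :
    ∀ (stack result : List String),
      (∀ s ∈ stack, PySem.Str.isIn "|" s = true → ∀ b ∈ pvBits s, PySem.Str.isIn "|" b = false) →
      pvMu stack ≤ fuel →
      pvCleanB fuel stack result = result ++ stack.flatMap pvF := by
  induction fuel with
  | zero =>
    intro stack result _ hmu
    cases stack with
    | nil => rw [List.flatMap_nil, List.append_nil]; rfl
    | cons a t =>
      exfalso
      have : 1 ≤ pvMu (a :: t) := by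
        unfold pvMu pvCost; rw [List.map_cons, List.sum_cons]; omega
      omega
  | succ fuel ih =>
    intro stack result hg hmu
    cases stack with
    | nil => rw [List.flatMap_nil, List.append_nil]; rfl
    | cons a t =>
      show (if PySem.Str.isIn "|" a then pvCleanB fuel (pvBits a ++ t) result
            else pvCleanB fuel t (result ++ [a])) = _
      rw [List.flatMap_cons]
      by_cases hpipe : PySem.Str.isIn "|" a = true
      · rw [if_pos hpipe]
        have hbits : ∀ b ∈ pvBits a, PySem.Str.isIn "|" b = false := hg a (List.mem_cons_self ..) hpipe
        have hmu' : pvMu (pvBits a ++ t) ≤ fuel := by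
          have h1 : pvMu (pvBits a) = (pvBits a).length := pvMu_pipeFree hbits
          have h2 : pvMu (a :: t) = 1 + (pvBits a).length + pvMu t := by
            unfold pvMu pvCost
            rw [List.map_cons, List.sum_cons, if_pos hpipe]
          have h3 : pvMu (pvBits a ++ t) = pvMu (pvBits a) + pvMu t := by
            unfold pvMu; rw [List.map_append, List.sum_append]
          omega
        rw [ih (pvBits a ++ t) result
            (by intro s hs
                rcases List.mem_append.1 hs with h | h
                · intro hp; rw [hbits s h] at hp; exact absurd hp Bool.false_ne_true
                · exact hg s (List.mem_cons_of_mem _ h)) hmu']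
        rw [pvF, if_pos hpipe, List.flatMap_append, pvFlatMap_pipeFree hbits]
      · rw [if_neg hpipe]
        have hmu' : pvMu t ≤ fuel := by
          have : 1 ≤ pvCost a := by unfold pvCost; omega
          unfold pvMu at hmu ⊢
          rw [List.map_cons, List.sum_cons] at hmu
          omega
        rw [ih t (result ++ [a]) (fun s hs => hg s (List.mem_cons_of_mem _ hs)) hmu']
        rw [pvF, if_neg hpipe, List.append_assoc, List.singleton_append]

theorem pvFuelB_ge_mu (scopes : List String) : pvMu scopes ≤ pvFuelB scopes := by
  have h : (scopes.map pvCost).sum ≤ (scopes.map (fun s => 1 + (pvBits s).length)).sum := by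
    apply List.sum_le_sum
    intro s _
    unfold pvCost
    split <;> omega
  unfold pvMu pvFuelB
  omega

-- ===== VERDICT (by name: the statement is the Claim_ definition above) =====
theorem clean_scopes_spec : Claim_equal_clean_scopes := by
  intro scopes _ hp
  unfold Spec_clean_scopes clean_scopes clean_scopes_alt
  rw [pvCleanA_eq_flatMap scopes.length hp,
    pvCleanB_eq (pvFuelB scopes) scopes [] hp (pvFuelB_ge_mu scopes)]
  rw [List.nil_append]
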